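-- pv_equiv track=rewrite | github.com/steveSchwering/lichtheim_memory | artificial_language/SGInterface.py | _get_gi_pattern_timing_signal
-- ===== SOURCE A (Python) =====
-- def _get_gi_pattern_timing_signal(sentence_role_to_filler):
--     """
--     """
--     flag_before_verb = True
--
--     timing = []
--     for role, word in sentence_role_to_filler.items():
--         if role == 'verb':
--             timing.append('verb')
--             flag_before_verb = False
--
--         if flag_before_verb:
--             timing.append('before_verb')
--
--         else:
--             timing.append('post_verbal')
--
--     return timing
-- ===== SOURCE B (Python) =====
-- def _get_gi_pattern_timing_signal(sentence_role_to_filler):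
--     keys = list(sentence_role_to_filler)
--     if 'verb' in keys:
--         i = keys.index('verb')
--         return (['before_verb'] * i
--                 + ['verb', 'post_verbal']
--                 + ['post_verbal'] * (len(keys) - i - 1))
--     return ['before_verb'] * len(keys)
-- ===== Notes on version B (the rewrite author's own statement) =====
-- stated objective: simpler
-- what changed: Replaces the stateful per-item flag loop with locating the verb's index once and constructing the result by list replication and concatenation.
import Mathlib
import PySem

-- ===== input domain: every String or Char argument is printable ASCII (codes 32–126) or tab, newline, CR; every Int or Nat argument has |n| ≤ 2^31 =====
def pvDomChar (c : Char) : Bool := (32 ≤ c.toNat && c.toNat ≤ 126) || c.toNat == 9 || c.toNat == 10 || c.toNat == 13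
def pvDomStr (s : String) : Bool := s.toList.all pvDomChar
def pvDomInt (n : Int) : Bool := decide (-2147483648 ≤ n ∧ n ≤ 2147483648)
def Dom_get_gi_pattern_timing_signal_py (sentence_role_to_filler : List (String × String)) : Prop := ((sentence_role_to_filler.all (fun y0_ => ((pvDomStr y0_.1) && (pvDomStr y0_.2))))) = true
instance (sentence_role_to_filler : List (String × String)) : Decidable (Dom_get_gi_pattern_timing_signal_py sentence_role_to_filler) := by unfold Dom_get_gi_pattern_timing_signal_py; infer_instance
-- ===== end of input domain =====

-- B replaces A's stateful flag loop by finding the verb's index once and building the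
-- result from replicated segments (objective: simpler decomposition, same cost).


-- ===== PORT A =====
-- for role, word in d.items(): append 'verb' and drop the flag on the verb key,
-- then append 'before_verb' or 'post_verbal' according to the flag
def get_gi_pattern_timing_signal_py (sentence_role_to_filler : List (String × String)) : List String :=
  (sentence_role_to_filler.foldl
    (fun (st : Bool × List String) p =>
      let flag := st.1
      let timing := st.2
      let timing := if p.1 = "verb" then timing ++ ["verb"] else timing
      let flag := if p.1 = "verb" then false else flag
      if flag then (flag, timing ++ ["before_verb"]) else (flag, timing ++ ["post_verbal"]))
    (true, [])).2

-- ===== PORT B =====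
def get_gi_pattern_timing_signal_py_alt (sentence_role_to_filler : List (String × String)) : List String :=
  let keys := sentence_role_to_filler.map Prod.fst
  match PySem.List.index? keys "verb" with
  | some i => List.replicate i "before_verb" ++ ["verb", "post_verbal"]
      ++ List.replicate (keys.length - i - 1) "post_verbal"
  | none => List.replicate keys.length "before_verb"

-- ===== PRECONDITION & SPEC =====
-- The Python argument is a dict, whose keys are necessarily distinct; Pre_ states that the
-- association list faithfully represents one (no duplicate keys). It excludes no input the
-- Python function can actually receive.
def Pre_get_gi_pattern_timing_signal_py (sentence_role_to_filler : List (String × String)) : Prop :=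
  (sentence_role_to_filler.map Prod.fst).Nodup
instance (sentence_role_to_filler : List (String × String)) : Decidable (Pre_get_gi_pattern_timing_signal_py sentence_role_to_filler) := by unfold Pre_get_gi_pattern_timing_signal_py; infer_instance
def pvWitness_get_gi_pattern_timing_signal_py : (List (String × String)) :=
  [("agent", "dog"), ("verb", "ran"), ("patient", "cat")]
def Spec_get_gi_pattern_timing_signal_py (sentence_role_to_filler : List (String × String)) (out : List String) : Prop := out = get_gi_pattern_timing_signal_py_alt sentence_role_to_filler
instance (sentence_role_to_filler : List (String × String)) (out : List String) : Decidable (Spec_get_gi_pattern_timing_signal_py sentence_role_to_filler out) := by unfold Spec_get_gi_pattern_timing_signal_py; infer_instance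

-- ===== CLAIM (what is proved, stated in full; the proofs are below) =====
def Claim_equal_get_gi_pattern_timing_signal_py : Prop := ∀ (sentence_role_to_filler : List (String × String)), Dom_get_gi_pattern_timing_signal_py sentence_role_to_filler → Pre_get_gi_pattern_timing_signal_py sentence_role_to_filler → Spec_get_gi_pattern_timing_signal_py sentence_role_to_filler (get_gi_pattern_timing_signal_py sentence_role_to_filler)

-- ===== LEMMAS AND PROOFS =====

-- A's loop body, named for the lemmas
def pvStepA (st : Bool × List String) (p : String × String) : Bool × List String :=
  let flag := st.1
  let timing := st.2
  let timing := if p.1 = "verb" then timing ++ ["verb"] else timing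
  let flag := if p.1 = "verb" then false else flag
  if flag then (flag, timing ++ ["before_verb"]) else (flag, timing ++ ["post_verbal"])

lemma portA_eq_foldl (xs : List (String × String)) :
    get_gi_pattern_timing_signal_py xs = (xs.foldl pvStepA (true, [])).2 := rfl

lemma step_verb (acc : List String) (flag : Bool) (p : String × String) (hp : p.1 = "verb") :
    pvStepA (flag, acc) p = (false, acc ++ ["verb", "post_verbal"]) := by
  simp [pvStepA, hp]

lemma step_true (acc : List String) (p : String × String) (hp : p.1 ≠ "verb") :
    pvStepA (true, acc) p = (true, acc ++ ["before_verb"]) := by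
  simp [pvStepA, hp]

lemma step_false (acc : List String) (p : String × String) (hp : p.1 ≠ "verb") :
    pvStepA (false, acc) p = (false, acc ++ ["post_verbal"]) := by
  simp [pvStepA, hp]

-- once the flag is down and no further verb key occurs, every item appends 'post_verbal'
lemma foldl_false (xs : List (String × String)) (acc : List String)
    (h : "verb" ∉ xs.map Prod.fst) :
    xs.foldl pvStepA (false, acc) = (false, acc ++ List.replicate xs.length "post_verbal") := by
  induction xs generalizing acc with
  | nil => simp
  | cons p t ih =>
      simp only [List.map_cons, List.mem_cons, not_or] at h
      have hp : p.1 ≠ "verb" := fun hh => h.1 hh.symm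
      rw [List.foldl_cons, step_false acc p hp, ih _ h.2]
      simp [List.replicate_succ]

lemma main_lemma (xs : List (String × String)) (acc : List String)
    (hnd : (xs.map Prod.fst).Nodup) :
    (xs.foldl pvStepA (true, acc)).2 = acc ++
      (match PySem.List.index? (xs.map Prod.fst) "verb" with
       | some i => List.replicate i "before_verb" ++ ["verb", "post_verbal"]
           ++ List.replicate (xs.length - i - 1) "post_verbal"
       | none => List.replicate xs.length "before_verb") := by
  induction xs generalizing acc with
  | nil => simp [PySem.List.index?]
  | cons p t ih =>
      simp only [List.map_cons, List.nodup_cons] at hnd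
      by_cases hp : p.1 = "verb"
      · have ht : "verb" ∉ t.map Prod.fst := hp ▸ hnd.1
        rw [List.foldl_cons, step_verb acc true p hp, foldl_false t _ ht,
          List.map_cons, hp, PySem.List.index?_cons_self]
        simp
      · rw [List.foldl_cons, step_true acc p hp, ih _ hnd.2, List.map_cons,
          PySem.List.index?_cons_of_ne (t.map Prod.fst) hp]
        cases hidx : PySem.List.index? (t.map Prod.fst) "verb" with
        | none => simp [List.replicate_succ]
        | some i =>
            simp only [Option.map_some, List.length_cons]
            have hi : i < t.length := by
              obtain ⟨hk, _⟩ := PySem.List.getElem_of_index?_eq_some hidx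
              simpa using hk
            have harith : t.length + 1 - (i + 1) - 1 = t.length - i - 1 := by omega
            rw [harith]
            simp [List.replicate_succ]

-- ===== VERDICT (by name: the statement is the Claim_ definition above) =====
theorem get_gi_pattern_timing_signal_py_spec : Claim_equal_get_gi_pattern_timing_signal_py := by
  intro xs _ hpre
  show get_gi_pattern_timing_signal_py xs = get_gi_pattern_timing_signal_py_alt xs
  rw [portA_eq_foldl, main_lemma xs [] hpre]
  simp [get_gi_pattern_timing_signal_py_alt]
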